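-- pv_equiv track=rewrite | github.com/RussellDash332/kattis | src/Copycat Catcher/copycatcatcher.py | f
-- ===== SOURCE A (Python) =====
-- def f(c):
--     s = []; h = {}
--     for i in range(len(c)):
--         if len(c[i]) == 1 and c[i].isalpha():
--             if c[i] not in h: h[c[i]] = i
--             s.append(str(i-h[c[i]])); h[c[i]] = i
--         else: s.append(c[i])
--     return ' '.join(s)
-- ===== SOURCE B (Python) =====
-- def f(c):
--     def prev_occurrence(i, t):
--         for j in range(i - 1, -1, -1):
--             if c[j] == t:
--                 return j
--         return None
--     out = []
--     for i, t in enumerate(c):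
--         if len(t) == 1 and t.isalpha():
--             j = prev_occurrence(i, t)
--             out.append(str(i - j) if j is not None else '0')
--         else:
--             out.append(t)
--     return ' '.join(out)
-- ===== Notes on version B (the rewrite author's own statement) =====
-- stated objective: alternative
-- what changed: B replaces A's running last-occurrence dict with a stateless per-position backward scan for the previous equal token (plus enumerate/join assembly), trading the O(n) hash state for an O(n^2) but memoryless formulation.
import Mathlib
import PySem

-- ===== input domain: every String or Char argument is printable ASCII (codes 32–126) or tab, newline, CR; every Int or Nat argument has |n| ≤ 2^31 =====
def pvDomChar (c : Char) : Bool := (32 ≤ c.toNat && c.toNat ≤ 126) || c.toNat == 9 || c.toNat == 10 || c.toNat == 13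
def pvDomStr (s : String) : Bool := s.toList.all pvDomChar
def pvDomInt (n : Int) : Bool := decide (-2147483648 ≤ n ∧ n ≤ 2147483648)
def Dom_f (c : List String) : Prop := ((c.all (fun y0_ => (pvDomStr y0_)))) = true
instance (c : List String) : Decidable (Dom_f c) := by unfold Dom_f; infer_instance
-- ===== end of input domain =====

-- B replaces A's running last-occurrence dict with a stateless per-position backward scan
-- for the previous equal token; same return value, different algorithm ("alternative").

-- ===== PORT A =====
-- the loop 'for i in range(len(c))' with state s (output list) and h (last-occurrence dict)
def fGoA (c : List String) : Nat → List String → PySem.Dict String Int → List String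
  | i, s, h =>
    if hi : i < c.length then
      let t := (GetElem.getElem c i hi)
      if PySem.Str.len t == 1 && PySem.Str.strIsalpha t then
        let h1 := if h.contains t then h else h.insert t (i : Int)
        fGoA c (i+1) (s ++ [PySem.Int.toStr ((i : Int) - h1.getD t 0)]) (h1.insert t (i : Int))
      else fGoA c (i+1) (s ++ [t]) h
    else s
termination_by i => c.length - i

def f (c : List String) : String :=
  PySem.Str.join " " (fGoA c 0 [] PySem.Dict.empty)

-- ===== PORT B =====
-- prev_occurrence's loop 'for j in range(i-1, -1, -1)': current index j encoded as fuel j+1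
def prevScanB (c : List String) (t : String) : Nat → Option Nat
  | 0 => none
  | j+1 => if c.getD j "" == t then some j else prevScanB c t j

def f_alt (c : List String) : String :=
  PySem.Str.join " " ((PySem.List.enumerate c).map (fun p =>
    if PySem.Str.len p.2 == 1 && PySem.Str.strIsalpha p.2 then
      match prevScanB c p.2 p.1.toNat with
      | some j => PySem.Int.toStr (p.1 - (j : Int))
      | none => "0"
    else p.2))

-- ===== PRECONDITION & SPEC =====
def Spec_f (c : List String) (out : String) : Prop := out = f_alt c
instance (c : List String) (out : String) : Decidable (Spec_f c out) := by unfold Spec_f; infer_instance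

-- ===== CLAIM (what is proved, stated in full; the proofs are below) =====
def Claim_equal_f : Prop := ∀ (c : List String), Dom_f c → Spec_f c (f c)

-- ===== LEMMAS AND PROOFS =====

-- stepping the backward scan past one more processed position
lemma prevScanB_succ (c : List String) (t : String) (j : Nat) :
    prevScanB c t (j+1) = if c.getD j "" == t then some j else prevScanB c t j := rfl

-- main loop invariant: the dict h stores, for every variable token t, exactly the
-- index found by B's backward scan from position i
lemma loop_eq (c : List String) : ∀ (k i : Nat) (s : List String) (h : PySem.Dict String Int),
    i + k = c.length →
    (∀ t, (PySem.Str.len t == 1 && PySem.Str.strIsalpha t) = true →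
        h.get? t = (prevScanB c t i).map Int.ofNat) →
    fGoA c i s h = s ++ ((PySem.List.enumerate c).drop i).map (fun p =>
      if PySem.Str.len p.2 == 1 && PySem.Str.strIsalpha p.2 then
        match prevScanB c p.2 p.1.toNat with
        | some j => PySem.Int.toStr (p.1 - (j : Int))
        | none => "0"
      else p.2) := by
  intro k
  induction k with
  | zero =>
      intro i s h hlen _
      have hi : ¬ i < c.length := by omega
      rw [fGoA]
      simp [hi, PySem.List.length_enumerate]
      omega
  | succ k ih =>
      intro i s h hlen hinv
      have hi : i < c.length := by omega
      have hie : i < (PySem.List.enumerate c).length := by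
        simpa [PySem.List.length_enumerate] using hi
      have hdrop : (PySem.List.enumerate c).drop i
          = ((i : Int), (GetElem.getElem c i hi)) :: (PySem.List.enumerate c).drop (i+1) := by
        rw [List.drop_eq_getElem_cons hie]
        simp [PySem.List.getElem_enumerate]
      have hget : c.getD i "" = (GetElem.getElem c i hi) := by
        simp [List.getD, List.getElem?_eq_getElem hi]
      rw [fGoA]
      simp only [hi, dif_pos]
      by_cases hv : (PySem.Str.len (GetElem.getElem c i hi) == 1
          && PySem.Str.strIsalpha (GetElem.getElem c i hi)) = true
      · -- variable token
        rw [if_pos hv]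
        -- invariant for the updated dict
        have hinv' : ∀ t, (PySem.Str.len t == 1 && PySem.Str.strIsalpha t) = true →
            ((if h.contains (GetElem.getElem c i hi) then h
              else h.insert (GetElem.getElem c i hi) (i : Int)).insert
                (GetElem.getElem c i hi) (i : Int)).get? t
              = (prevScanB c t (i+1)).map Int.ofNat := by
          intro t ht
          by_cases hteq : t = (GetElem.getElem c i hi)
          · subst hteq
            rw [PySem.Dict.get?_insert_self, prevScanB_succ, hget, if_pos (by simp)]
            rfl
          · have hne : (c.getD i "" == t) = false := by
              rw [hget]; simpa using (fun e => hteq e.symm)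
            rw [PySem.Dict.get?_insert_of_ne _ _ hteq, prevScanB_succ, hne]
            simp only [if_false, Bool.false_eq_true]
            by_cases hc : h.contains (GetElem.getElem c i hi)
            · rw [if_pos hc]; exact hinv t ht
            · rw [if_neg hc, PySem.Dict.get?_insert_of_ne _ _ hteq]
              exact hinv t ht
        -- the emitted string agrees with B's emitted string at position i
        have hval : PySem.Int.toStr ((i : Int) -
            (if h.contains (GetElem.getElem c i hi) then h
             else h.insert (GetElem.getElem c i hi) (i : Int)).getD (GetElem.getElem c i hi) 0)
            = (match prevScanB c (GetElem.getElem c i hi) i with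
               | some j => PySem.Int.toStr ((i : Int) - (j : Int))
               | none => "0") := by
          by_cases hc : h.contains (GetElem.getElem c i hi)
          · have hsome : (h.get? (GetElem.getElem c i hi)).isSome := by
              rwa [← PySem.Dict.contains_eq_isSome_get?]
            obtain ⟨v, hvv⟩ := Option.isSome_iff_exists.mp hsome
            have hiv := hinv (GetElem.getElem c i hi) hv
            rw [hvv] at hiv
            cases hps : prevScanB c (GetElem.getElem c i hi) i with
            | none => rw [hps] at hiv; simp at hiv
            | some j =>
                rw [hps] at hiv
                simp only [Option.map_some] at hiv
                have hvj : v = Int.ofNat j := by injection hiv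
                rw [if_pos hc, PySem.Dict.getD_eq_get?_getD, hvv]
                simp [hvj]
          · have hnone : h.get? (GetElem.getElem c i hi) = none := by
              rw [PySem.Dict.get?_eq_none_iff_contains]; simpa using hc
            have hiv := hinv (GetElem.getElem c i hi) hv
            rw [hnone] at hiv
            cases hps : prevScanB c (GetElem.getElem c i hi) i with
            | some j => rw [hps] at hiv; simp at hiv
            | none =>
                rw [if_neg hc, PySem.Dict.getD_insert_self, sub_self]
                show PySem.Int.toStr 0 = "0"
                decide
        rw [ih (i+1) _ _ (by omega) hinv', hdrop]
        simp only [List.map_cons, Int.toNat_natCast]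
        rw [if_pos hv, hval]
        simp
      · -- non-variable token
        rw [if_neg hv]
        have hinv' : ∀ t, (PySem.Str.len t == 1 && PySem.Str.strIsalpha t) = true →
            h.get? t = (prevScanB c t (i+1)).map Int.ofNat := by
          intro t ht
          have hteq : ¬ t = (GetElem.getElem c i hi) := by
            intro e; rw [e] at ht; exact hv ht
          have hne : (c.getD i "" == t) = false := by
            rw [hget]; simpa using (fun e => hteq e.symm)
          rw [prevScanB_succ, hne]
          simp only [if_false, Bool.false_eq_true]
          exact hinv t ht
        rw [ih (i+1) _ _ (by omega) hinv', hdrop]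
        simp only [List.map_cons, Int.toNat_natCast]
        rw [if_neg hv]
        simp

-- ===== VERDICT (by name: the statement is the Claim_ definition above) =====
theorem f_spec : Claim_equal_f := by
  intro c _
  unfold Spec_f f f_alt
  rw [loop_eq c c.length 0 [] PySem.Dict.empty (by omega)
    (by intro t _; simp [prevScanB, PySem.Dict.get?_empty])]
  simp
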